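-- pv_equiv track=rewrite | github.com/deepchem/deepchem | deepchem/utils/dft_utils/hamilton/intor/molintor.py | _get_uniqueness
-- ===== SOURCE A (Python) =====
-- from typing import Optional, List, Tuple, Callable, Dict, no_type_check
--
-- def _get_uniqueness(a: List) -> List[int]:
--     """
--     Get the uniqueness pattern from the list.
--
--     Examples
--     --------
--     >>> a = [1, 2, 3, 1, 2]
--     >>> _get_uniqueness(a)
--     [0, 1, 2, 0, 1]
--
--     Parameters
--     ----------
--     a : List
--         List of elements.
--
--     Returns
--     -------
--     List[int]
--         List representing the uniqueness pattern.
--     """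
--     s: Dict = {}
--     res: List[int] = []
--     i = 0
--     for elmt in a:
--         if elmt in s:
--             res.append(s[elmt])
--         else:
--             s[elmt] = i
--             res.append(i)
--             i += 1
--     return res
-- ===== SOURCE B (Python) =====
-- def _get_uniqueness(a):
--     """Build the ordered distinct elements first, then a value->index table,
--     then map the input through the table in a second, branch-free pass."""
--     seen = list(dict.fromkeys(a))
--     index = {v: i for i, v in enumerate(seen)}
--     return [index[x] for x in a]
-- ===== Notes on version B (the rewrite author's own statement) =====
-- stated objective: simpler
-- what changed: Replaces the single interleaved pass whose if/else grows the dict while emitting results with two separate phases: an ordered dedup (dict.fromkeys) plus a pre-built value-to-index table, followed by a branch-free mapping pass.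
import Mathlib
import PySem

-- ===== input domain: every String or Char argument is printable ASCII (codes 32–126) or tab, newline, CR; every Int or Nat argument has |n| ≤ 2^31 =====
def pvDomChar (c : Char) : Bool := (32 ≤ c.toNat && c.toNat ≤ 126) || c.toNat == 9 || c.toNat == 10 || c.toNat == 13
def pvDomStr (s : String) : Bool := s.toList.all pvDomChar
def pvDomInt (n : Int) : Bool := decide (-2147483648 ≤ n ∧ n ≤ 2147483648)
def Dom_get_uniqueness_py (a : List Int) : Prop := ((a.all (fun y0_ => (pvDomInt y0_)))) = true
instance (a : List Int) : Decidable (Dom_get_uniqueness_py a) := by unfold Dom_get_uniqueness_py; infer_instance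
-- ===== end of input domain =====

-- B replaces A's single interleaved pass (dict grown inside an if/else while emitting) by a
-- build-table-first decomposition: ordered dedup, then an index table, then a branch-free map.

-- ===== PORT A =====
-- state = (s, res, i); `res.append(s[elmt])` runs only under `elmt in s`, so getD is exact there
def get_uniqueness_py (a : List Int) : List Int :=
  (a.foldl
    (fun (st : PySem.Dict Int Int × List Int × Int) elmt =>
      let (s, res, i) := st
      if s.contains elmt then (s, res ++ [s.getD elmt 0], i)
      else (s.insert elmt i, res ++ [i], i + 1))
    (PySem.Dict.empty, [], 0)).2.1

-- ===== PORT B =====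
-- seen = list(dict.fromkeys(a)); index = {v: i for i, v in enumerate(seen)}; [index[x] for x in a]
-- `index[x]` never misses (every x of a is in seen), so getD is exact there
def get_uniqueness_py_alt (a : List Int) : List Int :=
  let seen := PySem.List.dedup a
  let index := (PySem.List.enumerate seen).foldl
    (fun (d : PySem.Dict Int Int) p => d.insert p.2 p.1) PySem.Dict.empty
  a.map (fun x => index.getD x 0)

-- ===== PRECONDITION & SPEC =====
def Spec_get_uniqueness_py (a : List Int) (out : List Int) : Prop := out = get_uniqueness_py_alt a
instance (a : List Int) (out : List Int) : Decidable (Spec_get_uniqueness_py a out) := by unfold Spec_get_uniqueness_py; infer_instance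

-- ===== CLAIM (what is proved, stated in full; the proofs are below) =====
def Claim_equal_get_uniqueness_py : Prop := ∀ (a : List Int), Dom_get_uniqueness_py a → Spec_get_uniqueness_py a (get_uniqueness_py a)

-- ===== LEMMAS AND PROOFS =====

-- the ranks A emits while its seen-list is L (proof-only reference function)
def pvRank (L : List Int) : List Int → List Int
  | [] => []
  | x :: xs =>
      if x ∈ L then (L.idxOf x : Int) :: pvRank L xs
      else (L.length : Int) :: pvRank (L ++ [x]) xs

theorem pvFoldl_add_append (rest L : List Int) :
    ∃ t, rest.foldl PySem.Set.add L = L ++ t := by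
  induction rest generalizing L with
  | nil => exact ⟨[], by simp⟩
  | cons x xs ih =>
    rw [List.foldl_cons, PySem.Set.add_eq_ite]
    split_ifs with hx
    · exact ih L
    · obtain ⟨t, ht⟩ := ih (L ++ [x])
      exact ⟨[x] ++ t, by simpa using ht⟩

theorem pvRank_eq_map (rest L : List Int) :
    pvRank L rest = rest.map (fun x => ((rest.foldl PySem.Set.add L).idxOf x : Int)) := by
  induction rest generalizing L with
  | nil => simp [pvRank]
  | cons x xs ih =>
    rw [pvRank, List.map_cons, List.foldl_cons, PySem.Set.add_eq_ite]
    split_ifs with hx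
    · rw [ih L]
      obtain ⟨t, ht⟩ := pvFoldl_add_append xs L
      rw [ht, List.idxOf_append_of_mem hx]
    · rw [ih (L ++ [x])]
      obtain ⟨t, ht⟩ := pvFoldl_add_append xs (L ++ [x])
      rw [ht, List.append_assoc, List.idxOf_append_of_notMem hx]
      simp

-- A's loop, run from a dict that tabulates first-occurrence ranks of L, appends pvRank L rest
theorem pvLoopA (rest : List Int) (L : List Int) (s : PySem.Dict Int Int) (res : List Int)
    (hs : ∀ v, s.get? v = if v ∈ L then some ((L.idxOf v : Nat) : Int) else none) :
    (rest.foldl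
      (fun (st : PySem.Dict Int Int × List Int × Int) elmt =>
        let (s, res, i) := st
        if s.contains elmt then (s, res ++ [s.getD elmt 0], i)
        else (s.insert elmt i, res ++ [i], i + 1))
      (s, res, (L.length : Int))).2.1 = res ++ pvRank L rest := by
  induction rest generalizing L s res with
  | nil => simp [pvRank]
  | cons x xs ih =>
    rw [List.foldl_cons]
    by_cases hx : x ∈ L
    · have hr : pvRank L (x :: xs) = ((L.idxOf x : Nat) : Int) :: pvRank L xs := by
        simp [pvRank, hx]
      have hc : s.contains x = true := by
        rw [PySem.Dict.contains_eq_isSome_get?, hs x]; simp [hx]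
      have hg : s.getD x 0 = ((L.idxOf x : Nat) : Int) := by
        rw [PySem.Dict.getD_eq_get?_getD, hs x]; simp [hx]
      simp only [hc, if_true, hg]
      rw [ih L s (res ++ [((L.idxOf x : Nat) : Int)]) hs, hr, List.append_assoc]
      simp
    · have hr : pvRank L (x :: xs) = ((L.length : Nat) : Int) :: pvRank (L ++ [x]) xs := by
        simp [pvRank, hx]
      have hc : s.contains x = false := by
        rw [PySem.Dict.contains_eq_isSome_get?, hs x]; simp [hx]
      simp only [hc, Bool.false_eq_true, if_false]
      have hlen : ((L.length : Int) + 1) = (((L ++ [x]).length : Nat) : Int) := by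
        simp
      have hs' : ∀ v, (s.insert x (L.length : Int)).get? v =
          if v ∈ L ++ [x] then some (((L ++ [x]).idxOf v : Nat) : Int) else none := by
        intro v
        rw [PySem.Dict.get?_insert]
        by_cases hv : v = x
        · subst hv
          simp [List.idxOf_append_of_notMem hx]
        · rw [if_neg hv, hs v]
          by_cases hvL : v ∈ L
          · rw [if_pos hvL, if_pos (by simp [hvL]), List.idxOf_append_of_mem hvL]
          · rw [if_neg hvL, if_neg (by simp [hvL, hv])]
      rw [hlen, ih (L ++ [x]) _ _ hs', hr, List.append_assoc]
      simp

-- B's table lookup: inserting (v, k+rank) for enumerate(seen, k) tabulates idxOf in seen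
theorem pvLookup (seen : List Int) (k : Int) (d : PySem.Dict Int Int) (hnd : seen.Nodup)
    (x : Int) :
    ((PySem.List.enumerate seen k).foldl
        (fun (d : PySem.Dict Int Int) p => d.insert p.2 p.1) d).getD x 0 =
      if x ∈ seen then k + ((seen.idxOf x : Nat) : Int) else d.getD x 0 := by
  induction seen generalizing k d with
  | nil => simp [PySem.List.enumerate_nil]
  | cons y ys ih =>
    rw [PySem.List.enumerate_cons, List.foldl_cons]
    rcases List.nodup_cons.mp hnd with ⟨hy, hys⟩
    rw [ih (k + 1) _ hys]
    by_cases hx : x ∈ ys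
    · have hxy : x ≠ y := fun h => hy (h ▸ hx)
      rw [if_pos hx, if_pos (by simp [hx])]
      rw [List.idxOf_cons_ne _ (by exact fun h => hxy h.symm)]
      push_cast; ring
    · rw [if_neg hx]
      by_cases hxy : x = y
      · subst hxy
        rw [if_pos (by simp), List.idxOf_cons_self, PySem.Dict.getD_insert, if_pos rfl]
        simp
      · rw [if_neg (by simp [hx, hxy]), PySem.Dict.getD_insert, if_neg hxy]

-- ===== VERDICT (by name: the statement is the Claim_ definition above) =====
theorem get_uniqueness_py_spec : Claim_equal_get_uniqueness_py := by
  intro a _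
  unfold Spec_get_uniqueness_py get_uniqueness_py get_uniqueness_py_alt
  have hA := pvLoopA a [] PySem.Dict.empty []
    (by intro v; simp [PySem.Dict.get?_empty])
  simp only [List.length_nil, Nat.cast_zero, List.nil_append] at hA
  rw [hA, pvRank_eq_map]
  apply List.map_congr_left
  intro x hx
  rw [pvLookup _ 0 _ (PySem.List.dedup_eq_ofList a ▸ PySem.Set.nodup_ofList a) x,
    if_pos (by rw [PySem.List.mem_dedup]; exact hx)]
  have : PySem.List.dedup a = a.foldl PySem.Set.add [] := by
    rw [PySem.List.dedup_eq_ofList, PySem.Set.ofList_eq_foldl]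
  rw [this]
  simp
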